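-- pv_equiv track=rewrite | github.com/viniciusborges17/LP2_2s2017 | lista2/test_ex02_string_splosion.py | string_splosion
-- ===== SOURCE A (Python) =====
-- def string_splosion(s):
--   s = list(s)
--   lista =[]
--   i = 0
--   j = 1
--   while i < len(s):
--     for a in range(0,j):
--       lista.append(s[a])
--     i+=1
--     j+=1
--
--   return ''.join(lista)
-- ===== SOURCE B (Python) =====
-- def string_splosion(s):
--     result = ""
--     prefix = ""
--     for c in s:
--         prefix += c
--         result += prefix
--     return result
-- ===== Notes on version B (the rewrite author's own statement) =====
-- stated objective: simpler
-- what changed: Replaces A's while-loop with a nested indexed re-scan (re-appending characters from index 0 each round) by a single pass over the characters that threads a growing prefix accumulator and appends it to the result.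
import Mathlib
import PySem

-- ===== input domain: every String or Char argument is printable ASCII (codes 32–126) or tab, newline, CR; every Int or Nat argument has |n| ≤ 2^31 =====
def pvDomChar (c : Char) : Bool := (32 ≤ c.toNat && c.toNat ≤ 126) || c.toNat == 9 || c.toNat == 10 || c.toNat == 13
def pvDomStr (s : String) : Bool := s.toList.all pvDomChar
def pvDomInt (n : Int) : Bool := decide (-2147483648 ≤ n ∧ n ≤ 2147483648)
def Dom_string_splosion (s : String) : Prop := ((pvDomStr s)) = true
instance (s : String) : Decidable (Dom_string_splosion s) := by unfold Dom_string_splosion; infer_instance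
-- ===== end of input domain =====

-- B replaces A's nested re-indexing loops by one pass threading a growing prefix accumulator (objective: simpler).

-- ===== PORT A =====
-- inner 'for a in range(0,j): lista.append(s[a])'; the index a < j ≤ len(s) is always in
-- range when A runs it, so pyGet? never returns none; getD supplies an unused default.
def aInner (cs lista : List Char) (j : Nat) : List Char :=
  (List.range j).foldl (fun acc (a : Nat) => acc ++ [(PySem.List.pyGet? cs (a : Int)).getD ' ']) lista

-- 'while i < len(s): …; i+=1; j+=1'
def aWhile (cs lista : List Char) (i j : Nat) : List Char :=
  if i < cs.length then aWhile cs (aInner cs lista j) (i + 1) (j + 1) else lista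
termination_by cs.length - i

def string_splosion (s : String) : String := String.ofList (aWhile s.toList [] 0 1)

-- ===== PORT B =====
-- single pass: for c in s: prefix += c; result += prefix
def bGo (cs prefixAcc result : List Char) : List Char :=
  match cs with
  | [] => result
  | c :: t => bGo t (prefixAcc ++ [c]) (result ++ (prefixAcc ++ [c]))

def string_splosion_alt (s : String) : String := String.ofList (bGo s.toList [] [])

-- ===== PRECONDITION & SPEC =====
def Spec_string_splosion (s : String) (out : String) : Prop := out = string_splosion_alt s
instance (s : String) (out : String) : Decidable (Spec_string_splosion s out) := by unfold Spec_string_splosion; infer_instance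

-- ===== CLAIM (what is proved, stated in full; the proofs are below) =====
def Claim_equal_string_splosion : Prop := ∀ (s : String), Dom_string_splosion s → Spec_string_splosion s (string_splosion s)

-- ===== LEMMAS AND PROOFS =====

-- common specification: spl p cs = concatenation of (p ++ take k cs) for k = 1..|cs|
def spl (p cs : List Char) : List Char :=
  match cs with
  | [] => []
  | c :: t => (p ++ [c]) ++ spl (p ++ [c]) t

theorem bGo_eq_spl (cs : List Char) : ∀ (p r : List Char), bGo cs p r = r ++ spl p cs := by
  induction cs with
  | nil => intro p r; simp [bGo, spl]
  | cons c t ih => intro p r; simp [bGo, spl, ih]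

theorem aInner_eq (cs lista : List Char) (j : Nat) (hj : j ≤ cs.length) :
    aInner cs lista j = lista ++ cs.take j := by
  induction j with
  | zero => simp [aInner]
  | succ k ih =>
    have hk : k < cs.length := by omega
    unfold aInner at *
    rw [List.range_succ, List.foldl_append, ih (by omega)]
    rw [← List.take_append_getElem hk]
    simp [List.foldl, PySem.List.pyGet?_natCast, List.getElem?_eq_getElem hk]

theorem spl_step (cs : List Char) (i : Nat) (hi : i < cs.length) :
    spl (cs.take i) (cs.drop i) = cs.take (i + 1) ++ spl (cs.take (i + 1)) (cs.drop (i + 1)) := by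
  have hd : cs.drop i = cs[i] :: cs.drop (i + 1) := List.drop_eq_getElem_cons hi
  have ht : cs.take i ++ [cs[i]] = cs.take (i + 1) := List.take_append_getElem hi
  rw [hd]
  simp only [spl]
  rw [ht]

theorem aWhile_eq (cs : List Char) : ∀ (i : Nat) (lista : List Char),
    aWhile cs lista i (i + 1) = lista ++ spl (cs.take i) (cs.drop i) := by
  intro i
  induction hn : cs.length - i generalizing i with
  | zero =>
    intro lista
    have : ¬ i < cs.length := by omega
    rw [aWhile]
    simp [this, List.drop_eq_nil_of_le (by omega : cs.length ≤ i), spl]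
  | succ n ih =>
    intro lista
    have hi : i < cs.length := by omega
    rw [aWhile]
    simp only [hi, if_pos]
    rw [aInner_eq cs lista (i + 1) (by omega), ih (i + 1) (by omega), spl_step cs i hi]
    simp

-- ===== VERDICT (by name: the statement is the Claim_ definition above) =====
theorem string_splosion_spec : Claim_equal_string_splosion := by
  intro s _
  show String.ofList (aWhile s.toList [] 0 1) = String.ofList (bGo s.toList [] [])
  rw [bGo_eq_spl, aWhile_eq s.toList 0 []]
  simp
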